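-- pv_equiv track=rewrite | github.com/akdl911215/algorithmTraining | python/algorithm/everything_algorithm/algorithm_study/level1/덧칠하기/덧칠하기4.py | solution
-- ===== SOURCE A (Python) =====
-- def solution(n, m, sections):
--     answer = 1
--     prev = sections[0]
--     for sec in sections:
--         if sec - prev >= m:
--             prev = sec
--             answer += 1
--
--     return answer
-- ===== SOURCE B (Python) =====
-- def solution(n, m, sections):
--     # pass 1: materialize the running-anchor sequence (prevs[i] = anchor in force
--     # just before section i is examined; prevs[0] = sections[0])
--     prevs = [sections[0]]
--     for sec in sections:
--         last = prevs[-1]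
--         prevs.append(sec if sec - last >= m else last)
--     # pass 2: count the positions whose section starts a new stroke
--     return 1 + sum(sec - p >= m for p, sec in zip(prevs, sections))
-- ===== Notes on version B (the rewrite author's own statement) =====
-- stated objective: alternative
-- what changed: Replaces the single-pass mutable (prev, answer) loop by two staged passes: pass one materializes the whole running-anchor sequence as a list, pass two zips it with the sections and counts the positions that start a stroke.
import Mathlib
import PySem

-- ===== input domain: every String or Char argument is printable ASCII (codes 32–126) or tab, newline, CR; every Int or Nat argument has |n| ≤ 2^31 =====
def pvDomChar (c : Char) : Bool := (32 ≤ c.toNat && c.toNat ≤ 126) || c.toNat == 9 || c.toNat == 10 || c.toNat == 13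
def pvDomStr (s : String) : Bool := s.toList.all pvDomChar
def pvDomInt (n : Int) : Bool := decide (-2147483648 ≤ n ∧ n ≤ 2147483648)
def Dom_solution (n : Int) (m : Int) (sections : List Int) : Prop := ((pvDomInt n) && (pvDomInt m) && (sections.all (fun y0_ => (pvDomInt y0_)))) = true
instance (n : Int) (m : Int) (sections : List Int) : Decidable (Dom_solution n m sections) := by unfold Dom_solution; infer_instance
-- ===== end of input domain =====

-- B replaces A's single-pass mutable (prev, answer) loop by two staged passes: first
-- materialize the running-anchor sequence as a list, then zip it with the sections and
-- count stroke starts; alternative decomposition, same cost.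


-- ===== PORT A =====
-- A's loop body: 'if sec - prev >= m: prev = sec; answer += 1'
def stepA (m : Int) (s : Int × Int) (sec : Int) : Int × Int :=
  if sec - s.1 ≥ m then (sec, s.2 + 1) else s

-- 'sections[0]' raises IndexError on []; that input is excluded by Pre_solution, the default 0 is never seen there.
def solution (n : Int) (m : Int) (sections : List Int) : Int :=
  (sections.foldl (stepA m) ((PySem.List.pyGet? sections 0).getD 0, 1)).2

-- ===== PORT B =====
-- pass-1 loop body: 'last = prevs[-1]; prevs.append(sec if sec - last >= m else last)'
-- (prevs is never empty, so 'prevs[-1]' is exactly 'prevs.getLast?.getD 0')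
def stepB (m : Int) (prevs : List Int) (sec : Int) : List Int :=
  let last := prevs.getLast?.getD 0
  prevs ++ [if sec - last ≥ m then sec else last]

-- 'sections[0]' raises IndexError on []; excluded by Pre_solution.
def solution_alt (n : Int) (m : Int) (sections : List Int) : Int :=
  1 + ((sections.foldl (stepB m) [(PySem.List.pyGet? sections 0).getD 0]).zip sections).foldl
        (fun c ps => c + (if ps.2 - ps.1 ≥ m then 1 else 0)) 0

-- ===== PRECONDITION & SPEC =====
-- Pre_ excludes only the empty list, on which the Python A (and B) raise IndexError at sections[0].
def Pre_solution (n : Int) (m : Int) (sections : List Int) : Prop := sections ≠ []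
instance (n : Int) (m : Int) (sections : List Int) : Decidable (Pre_solution n m sections) := by unfold Pre_solution; infer_instance
def pvWitness_solution : Int × Int × List Int := (8, 4, [2, 4, 6])

def Spec_solution (n : Int) (m : Int) (sections : List Int) (out : Int) : Prop := out = solution_alt n m sections
instance (n : Int) (m : Int) (sections : List Int) (out : Int) : Decidable (Spec_solution n m sections out) := by unfold Spec_solution; infer_instance

-- ===== CLAIM (what is proved, stated in full; the proofs are below) =====
def Claim_equal_solution : Prop := ∀ (n : Int) (m : Int) (sections : List Int), Dom_solution n m sections → Pre_solution n m sections → Spec_solution n m sections (solution n m sections)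

-- ===== LEMMAS AND PROOFS =====

-- proof-only helper: the running-anchor sequence B's pass 1 appends after an anchor `prev`
def chainB (m prev : Int) : List Int → List Int
  | [] => []
  | s :: ss =>
    let p' := if s - prev ≥ m then s else prev
    p' :: chainB m p' ss

theorem foldB_eq_chain (m : Int) :
    ∀ (ss acc : List Int) (prev : Int), acc.getLast?.getD 0 = prev →
      ss.foldl (stepB m) acc = acc ++ chainB m prev ss := by
  intro ss
  induction ss with
  | nil => intro acc prev h; simp [chainB]
  | cons s ss ih =>
    intro acc prev h
    simp only [List.foldl_cons, stepB, h]
    rw [ih (acc ++ [if s - prev ≥ m then s else prev]) (if s - prev ≥ m then s else prev)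
          (by simp)]
    simp [chainB]

-- shifting the count accumulator out of B's pass-2 fold
theorem foldCnt_shift (m : Int) :
    ∀ (l : List (Int × Int)) (c : Int),
      l.foldl (fun c ps => c + (if ps.2 - ps.1 ≥ m then 1 else 0)) c
        = c + l.foldl (fun c ps => c + (if ps.2 - ps.1 ≥ m then 1 else 0)) 0 := by
  intro l
  induction l with
  | nil => intro c; simp
  | cons p l ih => intro c; rw [List.foldl_cons, List.foldl_cons, ih, ih (0 + _)]; ring

-- A's fold equals the starting count plus B's pass-2 count over the anchor chain
theorem stepA_eq_cnt (m : Int) :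
    ∀ (ss : List Int) (prev c : Int),
      (ss.foldl (stepA m) (prev, c)).2
        = c + ((prev :: chainB m prev ss).zip ss).foldl
            (fun c ps => c + (if ps.2 - ps.1 ≥ m then 1 else 0)) 0 := by
  intro ss
  induction ss with
  | nil => intro prev c; simp
  | cons s ss ih =>
    intro prev c
    simp only [chainB, List.zip_cons_cons, List.foldl_cons, stepA]
    rw [foldCnt_shift]
    by_cases hf : s - prev ≥ m
    · simp only [if_pos hf]
      rw [ih s (c + 1)]; ring
    · simp only [if_neg hf]
      rw [ih prev c]; ring

-- ===== VERDICT (by name: the statement is the Claim_ definition above) =====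
theorem solution_spec : Claim_equal_solution := by
  intro n m sections _ _
  unfold Spec_solution solution solution_alt
  rw [foldB_eq_chain m sections [(PySem.List.pyGet? sections 0).getD 0]
        ((PySem.List.pyGet? sections 0).getD 0) (by simp)]
  simp only [List.singleton_append]
  rw [stepA_eq_cnt]
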